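-- pv_equiv track=rewrite | github.com/iQuHACK/2026-NVIDIA | team-submissions/Phase 2/utils.py | generate_symmetric_variants
-- ===== SOURCE A (Python) =====
-- from typing import List, Tuple, Dict
--
-- def generate_symmetric_variants(sequence: List[int]) -> List[List[int]]:
--     """
--     Generate all symmetric variants of a LABS sequence.
--
--     LABS has 4-fold symmetry:
--     1. Original sequence
--     2. Bit-flip: 0↔1 (or -1↔+1)
--     3. Time-reversal: Reverse the sequence
--     4. Combined: Bit-flip + time-reversal
--
--     All four variants have IDENTICAL LABS energy.
--
--     Args:
--         sequence: Original sequence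
--
--     Returns:
--         List of 4 symmetric variants
--
--     Example:
--         >>> variants = generate_symmetric_variants([0, 1, 0, 1])
--         >>> # variants[0] = [0, 1, 0, 1]  (original)
--         >>> # variants[1] = [1, 0, 1, 0]  (bit-flip)
--         >>> # variants[2] = [1, 0, 1, 0]  (time-reversal)
--         >>> # variants[3] = [0, 1, 0, 1]  (combined)
--     """
--     variants = []
--
--     # 1. Original
--     variants.append(sequence.copy())
--
--     # 2. Bit-flip (0↔1 or -1↔+1)
--     if all(s in [0, 1] for s in sequence):
--         # Binary: flip 0↔1
--         variants.append([1 - s for s in sequence])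
--     else:
--         # Spins: flip -1↔+1
--         variants.append([-s for s in sequence])
--
--     # 3. Time-reversal
--     variants.append(sequence[::-1])
--
--     # 4. Combined (bit-flip + time-reversal)
--     if all(s in [0, 1] for s in sequence):
--         variants.append([1 - s for s in sequence[::-1]])
--     else:
--         variants.append([-s for s in sequence[::-1]])
--
--     return variants
-- ===== SOURCE B (Python) =====
-- def generate_symmetric_variants(sequence):
--     # One pass: accumulate both flip candidates and the reversed lists
--     # (built by prepending) while also deciding the binary/spin flag.
--     is_bin = True
--     orig = []
--     flip_b = []
--     flip_s = []
--     rev = []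
--     rev_b = []
--     rev_s = []
--     for s in sequence:
--         if s != 0 and s != 1:
--             is_bin = False
--         orig.append(s)
--         flip_b.append(1 - s)
--         flip_s.append(-s)
--         rev = [s] + rev
--         rev_b = [1 - s] + rev_b
--         rev_s = [-s] + rev_s
--     if is_bin:
--         return [orig, flip_b, rev, rev_b]
--     return [orig, flip_s, rev, rev_s]
-- ===== Notes on version B (the rewrite author's own statement) =====
-- stated objective: alternative
-- what changed: A makes staged passes (all()-test, comprehensions, slicing, a second all()-test); B is one loop with accumulators that simultaneously builds both flip candidates and the time-reversed lists by prepending, and decides the binary/spin flag in the same pass, selecting the result at the end.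
import Mathlib
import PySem

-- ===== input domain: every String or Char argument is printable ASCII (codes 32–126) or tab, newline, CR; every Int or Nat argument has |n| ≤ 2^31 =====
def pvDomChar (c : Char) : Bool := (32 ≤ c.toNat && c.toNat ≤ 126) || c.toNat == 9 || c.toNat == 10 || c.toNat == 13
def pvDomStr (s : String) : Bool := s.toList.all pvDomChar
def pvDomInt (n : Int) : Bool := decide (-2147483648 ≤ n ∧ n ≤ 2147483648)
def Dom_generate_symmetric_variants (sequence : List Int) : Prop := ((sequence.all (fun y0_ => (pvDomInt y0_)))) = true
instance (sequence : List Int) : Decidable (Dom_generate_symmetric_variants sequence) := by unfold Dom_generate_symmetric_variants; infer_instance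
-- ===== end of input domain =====

-- B replaces A's staged passes (all()-tests, comprehensions, slicing) by one accumulator loop (alternative decomposition).
-- ===== PORT A =====
def generate_symmetric_variants (sequence : List Int) : List (List Int) :=
  let variants : List (List Int) := []
  let variants := variants ++ [sequence]
  let variants := variants ++
    [if sequence.all (fun s => decide (s ∈ ([0, 1] : List Int))) then
       sequence.map (fun s => 1 - s)
     else
       sequence.map (fun s => -s)]
  let variants := variants ++ [(PySem.List.slice? sequence none none (-1)).getD []]
  let variants := variants ++
    [if sequence.all (fun s => decide (s ∈ ([0, 1] : List Int))) then
       ((PySem.List.slice? sequence none none (-1)).getD []).map (fun s => 1 - s)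
     else
       ((PySem.List.slice? sequence none none (-1)).getD []).map (fun s => -s)]
  variants

-- ===== PORT B =====
-- single pass: loop state (is_bin, orig, flip_b, flip_s, rev, rev_b, rev_s)
def pvStepB (st : Bool × List Int × List Int × List Int × List Int × List Int × List Int)
    (s : Int) : Bool × List Int × List Int × List Int × List Int × List Int × List Int :=
  let (isBin, orig, flipB, flipS, rev, revB, revS) := st
  let isBin := if s ≠ 0 ∧ s ≠ 1 then false else isBin
  (isBin, orig ++ [s], flipB ++ [1 - s], flipS ++ [-s],
   [s] ++ rev, [1 - s] ++ revB, [-s] ++ revS)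

def generate_symmetric_variants_alt (sequence : List Int) : List (List Int) :=
  let (isBin, orig, flipB, flipS, rev, revB, revS) :=
    sequence.foldl pvStepB (true, [], [], [], [], [], [])
  if isBin then [orig, flipB, rev, revB] else [orig, flipS, rev, revS]

-- ===== PRECONDITION & SPEC =====
def Spec_generate_symmetric_variants (sequence : List Int) (out : List (List Int)) : Prop := out = generate_symmetric_variants_alt sequence
instance (sequence : List Int) (out : List (List Int)) : Decidable (Spec_generate_symmetric_variants sequence out) := by unfold Spec_generate_symmetric_variants; infer_instance

-- ===== CLAIM (what is proved, stated in full; the proofs are below) =====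
def Claim_equal_generate_symmetric_variants : Prop := ∀ (sequence : List Int), Dom_generate_symmetric_variants sequence → Spec_generate_symmetric_variants sequence (generate_symmetric_variants sequence)

-- ===== LEMMAS AND PROOFS =====
theorem pvFoldB_inv (l : List Int) (b : Bool) (o fb fs r rb rs : List Int) :
    l.foldl pvStepB (b, o, fb, fs, r, rb, rs) =
      (b && l.all (fun s => s == 0 || s == 1),
       o ++ l,
       fb ++ l.map (fun s => 1 - s),
       fs ++ l.map (fun s => -s),
       l.reverse ++ r,
       (l.map (fun s => 1 - s)).reverse ++ rb,
       (l.map (fun s => -s)).reverse ++ rs) := by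
  induction l generalizing b o fb fs r rb rs with
  | nil => simp
  | cons x xs ih =>
    have hb : ∀ c : Bool, (if x ≠ 0 ∧ x ≠ 1 then false else c) = (c && (x == 0 || x == 1)) := by
      intro c; by_cases h0 : x = 0 <;> by_cases h1 : x = 1 <;> simp [h0, h1]
    simp only [List.foldl_cons, pvStepB, List.all_cons, List.map_cons, List.reverse_cons, ih,
      hb, List.append_assoc, Bool.and_assoc]
    simp

theorem generate_symmetric_variants_spec : Claim_equal_generate_symmetric_variants := by
  intro sequence _
  unfold Spec_generate_symmetric_variants generate_symmetric_variants generate_symmetric_variants_alt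
  rw [pvFoldB_inv]
  simp only [PySem.List.slice?_none_none_neg_one, Option.getD_some, List.nil_append,
    List.append_nil, List.map_reverse, Bool.true_and]
  have : ∀ l : List Int, (l.all fun s => decide (s ∈ ([0, 1] : List Int))) =
      (l.all fun s => s == 0 || s == 1) := by
    intro l
    induction l with
    | nil => rfl
    | cons y ys ih =>
      rw [List.all_cons, List.all_cons, ih]
      congr 1
      by_cases h0 : y = 0 <;> by_cases h1 : y = 1 <;> simp [h0, h1]
  rw [this]
  split_ifs <;> simp
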